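-- pv_equiv track=rewrite | github.com/hhughes99/code_examples | genomeAssembly.py | binary_neighbors
-- ===== SOURCE A (Python) =====
-- def hamming(seq1, seq2):
--     return sum([1 for x, y in zip(seq1, seq2) if x != y])
--
-- def binary_neighbors(pattern, d):
--     if d == 0:
--         return {pattern}
--     if len(pattern) == 1:
--         return {'1', '0'}
--     neighborhood = set()
--     suffix_neighbors = binary_neighbors(pattern[1:], d)
--     for text in suffix_neighbors:
--         if hamming(pattern[1:], text) < d:
--             for x in '01':
--                 neighborhood.add(x + text)
--         else:
--             neighborhood.add(pattern[0] + text)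
--     return neighborhood
-- ===== SOURCE B (Python) =====
-- def binary_neighbors(pattern, d):
--     # Iterative right-to-left layer building: each layer holds (suffix, mismatches) pairs;
--     # a pair within budget branches to both bits, an exhausted pair keeps the pattern char.
--     if d == 0:
--         return {pattern}
--     rev = pattern[::-1]
--     level = [('1', rev[0] != '1'), ('0', rev[0] != '0')]
--     for c in rev[1:]:
--         nxt = []
--         for t, m in level:
--             if m < d:
--                 nxt.append(('0' + t, m + ('0' != c)))
--                 nxt.append(('1' + t, m + ('1' != c)))
--             else:
--                 nxt.append((c + t, m))
--         level = nxt
--     return {t for t, m in level}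
-- ===== Notes on version B (the rewrite author's own statement) =====
-- stated objective: alternative
-- what changed: Replaces the suffix recursion over sets, which recomputes the full Hamming distance of every candidate at every level, by an iterative right-to-left layer fold over a flat list of (suffix, mismatch-count) pairs, so the per-candidate O(n) distance recomputation disappears.
import Mathlib
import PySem

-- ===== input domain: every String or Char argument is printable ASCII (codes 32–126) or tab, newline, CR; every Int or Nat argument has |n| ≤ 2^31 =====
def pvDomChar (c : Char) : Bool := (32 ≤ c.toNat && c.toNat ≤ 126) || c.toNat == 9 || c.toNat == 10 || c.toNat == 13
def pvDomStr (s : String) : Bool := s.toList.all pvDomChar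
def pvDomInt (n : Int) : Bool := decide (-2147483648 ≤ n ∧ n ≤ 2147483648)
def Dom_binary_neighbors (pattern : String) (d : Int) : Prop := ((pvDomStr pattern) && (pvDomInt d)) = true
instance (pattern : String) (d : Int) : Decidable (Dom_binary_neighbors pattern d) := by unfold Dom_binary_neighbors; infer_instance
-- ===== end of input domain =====

-- B replaces A's suffix recursion (which branches on a freshly recomputed Hamming distance at
-- every level) by an iterative right-to-left layer fold carrying incremental mismatch counts;
-- same return value on the stated domain.


-- ===== PORT A =====

-- hamming(seq1, seq2) = sum([1 for x, y in zip(seq1, seq2) if x != y])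
def pv_hamming (seq1 seq2 : List Char) : Int :=
  (((seq1.zip seq2).filter (fun p => p.1 != p.2)).map (fun _ => (1 : Int))).sum

-- recursive worker on the character list of `pattern` (strings handled on the List Char side)
def bnA (cs : List Char) (d : Int) : List (List Char) :=
  if d == 0 then [cs]
  else
    match cs with
    | [] => []            -- Python never returns here (infinite recursion → RecursionError); outside Pre_
    | [_] => [['1'], ['0']]   -- len(pattern) == 1: return {'1', '0'}
    | c :: rest =>
      -- neighborhood = set(); for text in binary_neighbors(pattern[1:], d): …
      (bnA rest d).foldl
        (fun nb t =>
          if pv_hamming rest t < d then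
            ['0', '1'].foldl (fun nb x => PySem.Set.add nb (x :: t)) nb
          else
            PySem.Set.add nb (c :: t))
        PySem.Set.empty

def binary_neighbors (pattern : String) (d : Int) : List String :=
  (bnA pattern.toList d).map String.ofList

-- ===== PORT B =====

-- one loop iteration: nxt = []; for t, m in level: if m < d: append both bits else append (c + t, m)
def bnBstep (d : Int) (level : List (List Char × Int)) (c : Char) : List (List Char × Int) :=
  level.foldl (fun nxt tm =>
    if tm.2 < d then
      nxt ++ [(('0' : Char) :: tm.1, tm.2 + (if ('0' : Char) != c then (1 : Int) else 0)),
              (('1' : Char) :: tm.1, tm.2 + (if ('1' : Char) != c then (1 : Int) else 0))]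
    else
      nxt ++ [(c :: tm.1, tm.2)]) []

def binary_neighbors_alt (pattern : String) (d : Int) : List String :=
  if d == 0 then [pattern]
  else
    match pattern.toList.reverse with   -- rev = pattern[::-1]
    | [] => []          -- Python raises IndexError on rev[0] here; outside Pre_
    | r0 :: rrest =>
      let base : List (List Char × Int) :=
        [(['1'], if ('1' : Char) != r0 then (1 : Int) else 0),
         (['0'], if ('0' : Char) != r0 then (1 : Int) else 0)]
      let level := rrest.foldl (bnBstep d) base
      -- return {t for t, m in level}
      (level.foldl (fun s tm => PySem.Set.add s tm.1) PySem.Set.empty).map String.ofList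

-- ===== PRECONDITION & SPEC =====
-- Pre_ excludes exactly the inputs on which A never returns: an empty pattern with d ≠ 0 makes A
-- recurse forever (RecursionError); B raises IndexError on rev[0] there as well.
def Pre_binary_neighbors (pattern : String) (d : Int) : Prop :=
  d = 0 ∨ pattern.toList ≠ []
instance (pattern : String) (d : Int) : Decidable (Pre_binary_neighbors pattern d) := by
  unfold Pre_binary_neighbors; infer_instance

def pvWitness_binary_neighbors : String × Int := ("0110", 2)

def Spec_binary_neighbors (pattern : String) (d : Int) (out : List String) : Prop := out = binary_neighbors_alt pattern d
instance (pattern : String) (d : Int) (out : List String) : Decidable (Spec_binary_neighbors pattern d out) := by unfold Spec_binary_neighbors; infer_instance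

-- ===== CLAIM (what is proved, stated in full; the proofs are below) =====
def Claim_equal_binary_neighbors : Prop := ∀ (pattern : String) (d : Int), Dom_binary_neighbors pattern d → Pre_binary_neighbors pattern d → Spec_binary_neighbors pattern d (binary_neighbors pattern d)

-- ===== LEMMAS AND PROOFS =====

-- B's layer before the final set comprehension
def bnBfrom (d : Int) (r0 : Char) (rrest : List Char) : List (List Char × Int) :=
  rrest.foldl (bnBstep d)
    [(['1'], if ('1' : Char) != r0 then (1 : Int) else 0),
     (['0'], if ('0' : Char) != r0 then (1 : Int) else 0)]

def bnBlevel (cs : List Char) (d : Int) : List (List Char × Int) :=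
  match cs.reverse with
  | [] => []
  | r0 :: rrest => bnBfrom d r0 rrest

-- the per-text children list of A's loop body
def childA (c : Char) (d : Int) (rest : List Char) (t : List Char) : List (List Char) :=
  if pv_hamming rest t < d then [('0' : Char) :: t, ('1' : Char) :: t] else [c :: t]

-- the per-pair children list of B's loop body
def gB (d : Int) (c : Char) (tm : List Char × Int) : List (List Char × Int) :=
  if tm.2 < d then
    [(('0' : Char) :: tm.1, tm.2 + (if ('0' : Char) != c then (1 : Int) else 0)),
     (('1' : Char) :: tm.1, tm.2 + (if ('1' : Char) != c then (1 : Int) else 0))]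
  else
    [(c :: tm.1, tm.2)]

lemma bnBstep_flatMap (d : Int) (c : Char) (level : List (List Char × Int)) :
    bnBstep d level c = level.flatMap (gB d c) := by
  unfold bnBstep
  have h : (fun (nxt : List (List Char × Int)) tm =>
      if tm.2 < d then
        nxt ++ [(('0' : Char) :: tm.1, tm.2 + (if ('0' : Char) != c then (1 : Int) else 0)),
                (('1' : Char) :: tm.1, tm.2 + (if ('1' : Char) != c then (1 : Int) else 0))]
      else
        nxt ++ [(c :: tm.1, tm.2)])
      = fun nxt tm => nxt ++ gB d c tm := by
    funext nxt tm
    unfold gB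
    split <;> rfl
  rw [h]
  exact PySem.List.foldl_append_eq_flatMap (gB d c) level []

lemma pv_hamming_eq_length (s t : List Char) :
    pv_hamming s t = (((s.zip t).filter (fun p => p.1 != p.2)).length : Int) := by
  unfold pv_hamming
  simp [List.map_const']

lemma pv_hamming_nil (t : List Char) : pv_hamming [] t = 0 := by
  simp [pv_hamming]

lemma pv_hamming_cons (c x : Char) (s t : List Char) :
    pv_hamming (c :: s) (x :: t)
      = pv_hamming s t + (if (x != c) = true then (1 : Int) else 0) := by
  by_cases h : x = c
  · subst h
    simp only [pv_hamming_eq_length, List.zip_cons_cons, List.filter_cons, bne_self_eq_false,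
      Bool.false_eq_true, if_false, add_zero]
  · have hb : ((c, x).1 != (c, x).2) = true := by
      simp only [bne_iff_ne, ne_eq]; exact fun hh => h hh.symm
    have hb' : (x != c) = true := by
      simp only [bne_iff_ne, ne_eq]; exact h
    simp only [pv_hamming_eq_length, List.zip_cons_cons, List.filter_cons, hb, if_true,
      List.length_cons, hb']
    push_cast; ring

lemma mem_childA {c : Char} {d : Int} {rest t u : List Char} (h : u ∈ childA c d rest t) :
    ∃ x, u = x :: t := by
  unfold childA at h
  split at h
  · simp only [List.mem_cons, List.not_mem_nil, or_false] at h
    rcases h with h | h <;> exact ⟨_, h⟩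
  · simp only [List.mem_cons, List.not_mem_nil, or_false] at h
    exact ⟨_, h⟩

lemma nodup_childA (c : Char) (d : Int) (rest t : List Char) : (childA c d rest t).Nodup := by
  unfold childA; split <;> simp

-- fresh distinct elements folded in by Set.add simply append
lemma foldl_set_add_fresh : ∀ (ys acc : List (List Char)), ys.Nodup → (∀ y ∈ ys, y ∉ acc) →
    ys.foldl PySem.Set.add acc = acc ++ ys
  | [], acc, _, _ => by simp
  | y :: ys, acc, hnd, hfresh => by
    have hy : y ∉ acc := hfresh y (by simp)
    have hadd : PySem.Set.add acc y = acc ++ [y] := by simp [PySem.Set.add, hy]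
    have hrec := foldl_set_add_fresh ys (acc ++ [y]) (List.nodup_cons.mp hnd).2 (by
      intro z hz hmem
      rcases List.mem_append.mp hmem with h | h
      · exact hfresh z (List.mem_cons_of_mem _ hz) h
      · exact (List.nodup_cons.mp hnd).1 ((List.mem_singleton.mp h) ▸ hz))
    rw [List.foldl_cons, hadd, hrec, List.append_assoc, List.singleton_append]

-- A's loop over the suffix neighbourhood is a flatMap of the children lists
lemma foldl_bnA_step (c : Char) (d : Int) (rest : List Char) :
    ∀ (texts acc : List (List Char)), texts.Nodup →
      (∀ t ∈ texts, ∀ u ∈ childA c d rest t, u ∉ acc) →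
      texts.foldl
        (fun nb t =>
          if pv_hamming rest t < d then
            ['0', '1'].foldl (fun nb x => PySem.Set.add nb (x :: t)) nb
          else
            PySem.Set.add nb (c :: t)) acc
      = acc ++ texts.flatMap (childA c d rest)
  | [], acc, _, _ => by simp
  | t :: ts, acc, hnd, hfresh => by
    have hstep :
        (if pv_hamming rest t < d then
            ['0', '1'].foldl (fun nb x => PySem.Set.add nb (x :: t)) acc
          else PySem.Set.add acc (c :: t))
        = acc ++ childA c d rest t := by
      have hchild := foldl_set_add_fresh (childA c d rest t) acc (nodup_childA c d rest t)
        (fun u hu => hfresh t (by simp) u hu)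
      unfold childA at hchild ⊢
      by_cases h : pv_hamming rest t < d
      · rw [if_pos h] at hchild
        simp only [h, if_true]
        exact hchild
      · rw [if_neg h] at hchild
        simp only [h, if_false]
        exact hchild
    have hrec := foldl_bnA_step c d rest ts (acc ++ childA c d rest t)
      (List.nodup_cons.mp hnd).2 (by
        intro t' ht' u hu hmem
        rcases List.mem_append.mp hmem with h | h
        · exact hfresh t' (List.mem_cons_of_mem _ ht') u hu h
        · obtain ⟨x, rfl⟩ := mem_childA hu
          obtain ⟨x', hx'⟩ := mem_childA h
          injection hx' with _ h2
          exact (List.nodup_cons.mp hnd).1 (h2 ▸ ht'))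
    rw [List.foldl_cons, hstep, hrec, List.flatMap_cons, List.append_assoc]

lemma nodup_flatMap_childA (c : Char) (d : Int) (rest : List Char) :
    ∀ (texts : List (List Char)), texts.Nodup → (texts.flatMap (childA c d rest)).Nodup
  | [], _ => by simp
  | t :: ts, hnd => by
    rw [List.flatMap_cons, List.nodup_append]
    refine ⟨nodup_childA c d rest t,
      nodup_flatMap_childA c d rest ts (List.nodup_cons.mp hnd).2, ?_⟩
    intro u hu v hv
    obtain ⟨x, rfl⟩ := mem_childA hu
    obtain ⟨t', ht', hmem⟩ := List.mem_flatMap.mp hv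
    obtain ⟨x', rfl⟩ := mem_childA hmem
    intro heq
    injection heq with _ h2
    exact (List.nodup_cons.mp hnd).1 (h2 ▸ ht')

lemma bnBlevel_singleton (c : Char) (d : Int) :
    bnBlevel [c] d
      = [(['1'], if ('1' : Char) != c then (1 : Int) else 0),
         (['0'], if ('0' : Char) != c then (1 : Int) else 0)] := rfl

lemma bnBlevel_cons (c : Char) (d : Int) (rest : List Char) (h : rest ≠ []) :
    bnBlevel (c :: rest) d = bnBstep d (bnBlevel rest d) c := by
  rcases hr : rest.reverse with _ | ⟨r0, rrest⟩
  · exact absurd (by simpa using hr) h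
  · have h2 : (c :: rest).reverse = r0 :: (rrest ++ [c]) := by
      rw [List.reverse_cons, hr, List.cons_append]
    unfold bnBlevel
    rw [h2, hr]
    show bnBfrom d r0 (rrest ++ [c]) = bnBstep d (bnBfrom d r0 rrest) c
    unfold bnBfrom
    rw [List.foldl_append, List.foldl_cons, List.foldl_nil]

-- B's port equals the layer fold followed by the projection, for d ≠ 0
lemma alt_eq (pattern : String) (d : Int) (hz : ¬ d = 0) :
    binary_neighbors_alt pattern d
      = ((bnBlevel pattern.toList d).foldl (fun s tm => PySem.Set.add s tm.1)
          PySem.Set.empty).map String.ofList := by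
  unfold binary_neighbors_alt bnBlevel
  simp only [beq_iff_eq, hz, if_false]
  cases pattern.toList.reverse <;> rfl

-- the main invariant: B's layer is A's neighbourhood tagged with its Hamming distance,
-- and A's neighbourhood is duplicate-free
lemma main_invariant (d : Int) (hz : ¬ d = 0) :
    ∀ (cs : List Char), cs ≠ [] →
      bnBlevel cs d = (bnA cs d).map (fun t => (t, pv_hamming cs t))
      ∧ (bnA cs d).Nodup := by
  intro cs
  induction cs with
  | nil => intro h; exact absurd rfl h
  | cons c rest ih =>
    intro _
    rcases hrest : rest with _ | ⟨r, rs⟩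
    · -- base case: a single character
      subst hrest
      have hA : bnA [c] d = [['1'], ['0']] := by
        unfold bnA; simp [show ¬ d = 0 from hz]
      have hh1 : pv_hamming [c] ['1']
          = (if (('1' : Char) != c) = true then (1 : Int) else 0) := by
        rw [show ([c] : List Char) = c :: [] from rfl,
            show (['1'] : List Char) = '1' :: [] from rfl, pv_hamming_cons, pv_hamming_nil,
            zero_add]
      have hh0 : pv_hamming [c] ['0']
          = (if (('0' : Char) != c) = true then (1 : Int) else 0) := by
        rw [show ([c] : List Char) = c :: [] from rfl,
            show (['0'] : List Char) = '0' :: [] from rfl, pv_hamming_cons, pv_hamming_nil,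
            zero_add]
      refine ⟨?_, by rw [hA]; simp⟩
      rw [bnBlevel_singleton, hA, List.map_cons, List.map_cons, List.map_nil, hh1, hh0]
    · -- inductive step: cs = c :: rest with rest nonempty
      rw [← hrest]
      have hrne : rest ≠ [] := by rw [hrest]; simp
      obtain ⟨ihB, ihnd⟩ := ih (by rw [hrest]; simp)
      clear hrest
      -- A unfolds to the flatMap of children
      have hA : bnA (c :: rest) d = (bnA rest d).flatMap (childA c d rest) := by
        have hfold := foldl_bnA_step c d rest (bnA rest d) PySem.Set.empty ihnd
          (by intro t _ u _ hu; simp [PySem.Set.empty] at hu)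
        have hb : (d == 0) = false := beq_eq_false_iff_ne.mpr hz
        obtain ⟨r', rs', rfl⟩ : ∃ r' rs', rest = r' :: rs' := by
          cases rest with
          | nil => exact absurd rfl hrne
          | cons a b => exact ⟨a, b, rfl⟩
        conv_lhs => rw [show bnA (c :: r' :: rs') d
          = (if d == 0 then [c :: r' :: rs'] else
              (bnA (r' :: rs') d).foldl
                (fun nb t =>
                  if pv_hamming (r' :: rs') t < d then
                    ['0', '1'].foldl (fun nb x => PySem.Set.add nb (x :: t)) nb
                  else
                    PySem.Set.add nb (c :: t))
                PySem.Set.empty) from rfl]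
        rw [hb]
        simp only [Bool.false_eq_true, if_false]
        exact hfold.trans (by simp [PySem.Set.empty])
      -- B's step on the tagged list is the tagged flatMap
      have hB : bnBlevel (c :: rest) d
          = ((bnA rest d).flatMap (childA c d rest)).map
              (fun t => (t, pv_hamming (c :: rest) t)) := by
        rw [bnBlevel_cons c d rest hrne, ihB, bnBstep_flatMap]
        rw [List.flatMap_map, List.map_flatMap]
        refine List.flatMap_congr ?_
        intro t _
        unfold gB childA
        by_cases hlt : pv_hamming rest t < d
        · simp [hlt, pv_hamming_cons]
        · simp [hlt, pv_hamming_cons]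
      exact ⟨by rw [hB, hA], by rw [hA]; exact nodup_flatMap_childA c d rest _ ihnd⟩

-- ===== VERDICT (by name: the statement is the Claim_ definition above) =====
theorem binary_neighbors_spec : Claim_equal_binary_neighbors := by
  intro pattern d _ hpre
  unfold Spec_binary_neighbors
  by_cases hz : d = 0
  · subst hz
    unfold binary_neighbors binary_neighbors_alt bnA
    simp [String.ofList_toList]
  · rcases hpre with rfl | hne
    · exact absurd rfl hz
    · obtain ⟨hB, hnd⟩ := main_invariant d hz pattern.toList hne
      unfold binary_neighbors
      rw [alt_eq pattern d hz, hB, ← List.foldl_map]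
      have hfst : ((bnA pattern.toList d).map (fun t => (t, pv_hamming pattern.toList t))).map
          Prod.fst = bnA pattern.toList d := by
        simp [List.map_map, Function.comp_def]
      rw [hfst]
      have hfold := foldl_set_add_fresh (bnA pattern.toList d) [] hnd (by simp)
      rw [show (PySem.Set.empty : List (List Char)) = [] from rfl, hfold, List.nil_append]
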